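-- pv_equiv track=rewrite | github.com/rclaver/utilitats-python | web/apuntador.py | _compara_per_desplacament
-- ===== SOURCE A (Python) =====
-- def _compara_per_desplacament(a_txt1, a_txt2):
--    p1 = 0  #element actual de l'array 1
--    p2 = 0  #element actual de l'array 2
--    encert = 100
--    error = 0
--    for s1 in a_txt1:
--       p2 = 0
--       for s2 in a_txt2:
--          p2 += 1
--          if s1 == s2:
--             error = 0
--             p1 += 1
--             a_txt1 = a_txt1[p1:]
--             break
--          else:
--             encert -= 1
--             if error >= 3:
--                a_txt2 = a_txt2[p2:]
--                p2 = 0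
--                break
--    return encert
-- ===== SOURCE B (Python) =====
-- def _compara_per_desplacament(a_txt1, a_txt2):
--    first = {}
--    for i, s in enumerate(a_txt2):
--       first.setdefault(s, i)
--    n = len(a_txt2)
--    total = 0
--    for s in a_txt1:
--       total += first.get(s, n)
--    return 100 - total
-- ===== Notes on version B (the rewrite author's own statement) =====
-- stated objective: faster
-- what changed: Replaces A's nested scan of a_txt2 for every element of a_txt1 by building a first-index dictionary over a_txt2 once and doing a single summing pass over a_txt1 (A's error/slicing branches are dead or unobservable, so the per-element cost is exactly the first-match index or len(a_txt2)).
import Mathlib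
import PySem

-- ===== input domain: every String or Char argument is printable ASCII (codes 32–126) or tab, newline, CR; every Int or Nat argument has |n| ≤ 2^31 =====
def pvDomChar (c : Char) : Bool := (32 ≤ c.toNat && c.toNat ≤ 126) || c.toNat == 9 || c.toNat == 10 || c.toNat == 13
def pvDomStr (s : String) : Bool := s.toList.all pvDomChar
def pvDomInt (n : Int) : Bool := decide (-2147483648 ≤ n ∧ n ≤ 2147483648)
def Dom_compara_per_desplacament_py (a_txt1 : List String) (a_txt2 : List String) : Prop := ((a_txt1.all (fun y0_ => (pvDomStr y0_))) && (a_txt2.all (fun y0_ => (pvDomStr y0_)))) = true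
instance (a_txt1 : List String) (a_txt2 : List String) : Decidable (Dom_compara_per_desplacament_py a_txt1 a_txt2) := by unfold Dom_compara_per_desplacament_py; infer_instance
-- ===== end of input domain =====

-- B replaces A's nested scan by a first-index dictionary over a_txt2 plus one pass over a_txt1 (faster: O(n+m) vs O(n*m)).

-- ===== PORT A =====
-- inner 'for s2 in a_txt2' loop; state = (p1, encert, error, a_txt1, a_txt2), p2 passed separately
def pvInnerA (s1 : String) : List String → Int × Int × Int × List String × List String → Int →
    Int × Int × Int × List String × List String
  | [], st, _ => st
  | s2 :: rest, (p1, encert, error, t1, t2), p2 =>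
    let p2' := p2 + 1
    if s1 == s2 then
      let p1' := p1 + 1
      (p1', encert, 0, PySem.List.slice t1 (some p1') none, t2)
    else
      let encert' := encert - 1
      if error ≥ 3 then
        (p1, encert', error, t1, PySem.List.slice t2 (some p2') none)
      else
        pvInnerA s1 rest (p1, encert', error, t1, t2) p2'

def compara_per_desplacament_py (a_txt1 : List String) (a_txt2 : List String) : Int :=
  -- 'for s1 in a_txt1' iterates the list a_txt1 was bound to at loop entry;
  -- the rebindings of a_txt1/a_txt2 live in the state (components .2.2.2.1 / .2.2.2.2)
  (a_txt1.foldl (fun st s1 => pvInnerA s1 st.2.2.2.2 st 0) (0, 100, 0, a_txt1, a_txt2)).2.1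

-- ===== PORT B =====
def compara_per_desplacament_py_alt (a_txt1 : List String) (a_txt2 : List String) : Int :=
  let first := (PySem.List.enumerate a_txt2 0).foldl
      (fun d p => d.setdefault p.2 p.1) (PySem.Dict.empty : PySem.Dict String Int)
  let n := PySem.List.len a_txt2
  let total := a_txt1.foldl (fun t s => t + first.getD s n) 0
  100 - total

-- ===== PRECONDITION & SPEC =====
def Spec_compara_per_desplacament_py (a_txt1 : List String) (a_txt2 : List String) (out : Int) : Prop := out = compara_per_desplacament_py_alt a_txt1 a_txt2
instance (a_txt1 : List String) (a_txt2 : List String) (out : Int) : Decidable (Spec_compara_per_desplacament_py a_txt1 a_txt2 out) := by unfold Spec_compara_per_desplacament_py; infer_instance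

-- ===== CLAIM (what is proved, stated in full; the proofs are below) =====
def Claim_equal_compara_per_desplacament_py : Prop := ∀ (a_txt1 : List String) (a_txt2 : List String), Dom_compara_per_desplacament_py a_txt1 a_txt2 → Spec_compara_per_desplacament_py a_txt1 a_txt2 (compara_per_desplacament_py a_txt1 a_txt2)

-- ===== LEMMAS AND PROOFS =====

-- cost of one outer iteration of A: mismatches before the first match = idxOf (length when absent)
def pvCost (t2 : List String) (s : String) : Int := ((t2.idxOf s : Nat) : Int)

-- A's inner loop from error = 0: encert drops by pvCost, error stays 0, a_txt2 is untouched
theorem pvInnerA_spec (s1 : String) : ∀ (rest : List String) (p1 enc : Int)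
    (t1 t2 : List String) (p2 : Int),
    ∃ p1' t1', pvInnerA s1 rest (p1, enc, 0, t1, t2) p2 = (p1', enc - pvCost rest s1, 0, t1', t2)
  | [], p1, enc, t1, t2, p2 => by
    refine ⟨p1, t1, ?_⟩
    simp [pvInnerA, pvCost]
  | s2 :: rest, p1, enc, t1, t2, p2 => by
    by_cases h : s1 = s2
    · refine ⟨p1 + 1, PySem.List.slice t1 (some (p1 + 1)) none, ?_⟩
      subst h
      simp [pvInnerA, pvCost]
    · obtain ⟨p1', t1', ih⟩ := pvInnerA_spec s1 rest p1 (enc - 1) t1 t2 (p2 + 1)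
      refine ⟨p1', t1', ?_⟩
      have hb : (s1 == s2) = false := by simpa using h
      have hb2 : (s2 == s1) = false := by simpa using (Ne.symm h)
      simp only [pvInnerA, hb]
      norm_num
      rw [ih]
      simp [pvCost, List.idxOf_cons, hb2]
      ring

-- A's outer loop: encert = enc - sum of the per-element costs (against the ORIGINAL a_txt2)
theorem pvOuterA_spec (t2 : List String) : ∀ (l : List String) (p1 enc : Int) (t1 : List String),
    (l.foldl (fun st s1 => pvInnerA s1 st.2.2.2.2 st 0) (p1, enc, 0, t1, t2)).2.1
      = enc - (l.map (pvCost t2)).sum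
  | [], p1, enc, t1 => by simp
  | s :: l, p1, enc, t1 => by
    obtain ⟨p1', t1', h⟩ := pvInnerA_spec s t2 p1 enc t1 t2 0
    simp only [List.foldl_cons, h]
    rw [pvOuterA_spec t2 l p1' (enc - pvCost t2 s) t1']
    simp
    ring

-- B's dictionary build: get? of the setdefault-fold is the first matching index
theorem pvFoldSetdefault_get? : ∀ (ps : List (Int × String)) (d : PySem.Dict String Int) (s : String),
    (ps.foldl (fun d p => d.setdefault p.2 p.1) d).get? s
      = (d.get? s).or (((ps.find? (fun p => p.2 == s)).map (·.1)))
  | [], d, s => by cases h : d.get? s <;> simp [h]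
  | (i, x) :: ps, d, s => by
    rw [List.foldl_cons, pvFoldSetdefault_get? ps (d.setdefault x i) s]
    by_cases h : x = s
    · subst h
      rw [PySem.Dict.get?_setdefault_self]
      simp only [List.find?_cons, BEq.rfl]
      cases d.get? x <;> simp
    · rw [PySem.Dict.get?_setdefault_of_ne d i (Ne.symm h)]
      have hb : (x == s) = false := by simpa using h
      simp [hb]

-- first index in an enumerate list, related to idxOf
theorem pvFindEnumerate (s : String) : ∀ (t2 : List String) (k : Int),
    ((PySem.List.enumerate t2 k).find? (fun p => p.2 == s)).map (·.1)
      = if s ∈ t2 then some (k + pvCost t2 s) else none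
  | [], k => by simp [PySem.List.enumerate_nil]
  | x :: t2, k => by
    rw [PySem.List.enumerate_cons]
    by_cases h : x = s
    · subst h
      simp [pvCost]
    · have hb : (x == s) = false := by simpa using h
      have hb2 : (x == s) = false := hb
      simp only [List.find?_cons, hb]
      rw [pvFindEnumerate s t2 (k + 1)]
      by_cases hm : s ∈ t2
      · simp [hm, Ne.symm h, pvCost, List.idxOf_cons, hb2]
        ring
      · simp [hm, Ne.symm h]

-- B's per-element lookup equals A's per-element cost
theorem pvLookup_eq_cost (t2 : List String) (s : String) :
    ((PySem.List.enumerate t2 0).foldl (fun d p => d.setdefault p.2 p.1)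
        (PySem.Dict.empty : PySem.Dict String Int)).getD s (PySem.List.len t2)
      = pvCost t2 s := by
  rw [PySem.Dict.getD_eq_get?_getD, pvFoldSetdefault_get?, pvFindEnumerate]
  by_cases hm : s ∈ t2
  · simp [hm, PySem.Dict.get?_empty]
  · simp [hm, PySem.Dict.get?_empty, pvCost, PySem.List.len_eq]

-- ===== VERDICT (by name: the statement is the Claim_ definition above) =====
theorem compara_per_desplacament_py_spec : Claim_equal_compara_per_desplacament_py := by
  intro a_txt1 a_txt2 _
  unfold Spec_compara_per_desplacament_py
  unfold compara_per_desplacament_py compara_per_desplacament_py_alt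
  rw [pvOuterA_spec a_txt2 a_txt1 0 100 a_txt1]
  dsimp only
  rw [PySem.List.foldl_add]
  simp only [pvLookup_eq_cost]
  ring
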